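-- pv_equiv track=rewrite | github.com/MustafaKpn/advent-of-code-2024 | day2/part2.py | dampener
-- ===== SOURCE A (Python) =====
-- def check1(report):
--     sorted_lists = [sorted(report), sorted(report, reverse=True)]
--
--     return report in sorted_lists
--
-- def check2(report):
--     for i in range(1, len(report)):
--         if (abs(int(report[i-1]) - int(report[i])) > 3) or ((abs(int(report[i-1]) - int(report[i]))) < 1) or (int(report[i-1]) == int(report[i])):
--             return False
--     return True
--
-- def dampener(report):
--     state = False
--     for i in range(len(report)):
--         dampened_report = report.copy()
--         dampened_report.pop(i)
--         if check1(dampened_report) and check2(dampened_report):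
--             return True
--     return False
-- ===== SOURCE B (Python) =====
-- def dampener(report):
--     n = len(report)
--
--     def damp(cmp):
--         # linear scan: find the first adjacent pair violating cmp; only the two
--         # members of that pair are candidates for removal
--         def chain_from(j):
--             return all(cmp(report[k - 1], report[k]) for k in range(j, n))
--         for i in range(1, n):
--             if not cmp(report[i - 1], report[i]):
--                 drop_left = (i == 1 or cmp(report[i - 2], report[i])) and chain_from(i + 1)
--                 drop_right = (i == n - 1 or cmp(report[i - 1], report[i + 1])) and chain_from(i + 2)
--                 return drop_left or drop_right
--         return n >= 1
--
--     return damp(lambda a, b: 1 <= b - a <= 3) or damp(lambda a, b: 1 <= a - b <= 3)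
-- ===== Notes on version B (the rewrite author's own statement) =====
-- stated objective: faster
-- what changed: A tries every single-element removal and validates each copy by sorting it twice plus a pairwise pass; B makes one linear scan to the first adjacent pair violating the step rule and checks only the two local removals (of either pair member) in O(1) extra work each, for each direction.
import Mathlib
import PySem

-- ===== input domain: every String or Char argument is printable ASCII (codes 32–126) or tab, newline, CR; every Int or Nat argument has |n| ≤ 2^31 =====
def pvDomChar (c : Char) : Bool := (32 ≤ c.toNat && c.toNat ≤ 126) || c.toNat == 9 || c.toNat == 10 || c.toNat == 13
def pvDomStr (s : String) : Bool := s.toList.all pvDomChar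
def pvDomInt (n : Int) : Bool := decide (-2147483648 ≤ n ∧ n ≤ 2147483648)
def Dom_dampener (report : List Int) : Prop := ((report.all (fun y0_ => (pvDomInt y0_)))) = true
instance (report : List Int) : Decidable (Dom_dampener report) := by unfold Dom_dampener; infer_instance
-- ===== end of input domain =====

-- B replaces A's try-every-removal loop (each trial sorting the copy twice) by a single
-- linear scan: it finds the first adjacent pair violating the step rule and tests only the
-- two local removals that can repair it; objective: faster.

-- ===== PORT A =====
def check1 (report : List Int) : Bool :=
  let sorted_lists := [PySem.List.sorted report (fun x => x) false,
                       PySem.List.sorted report (fun x => x) true]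
  sorted_lists.contains report

def check2 (report : List Int) : Bool :=
  (PySem.List.pyRange 1 report.length 1).all (fun i =>
    !(decide (3 < |PySem.List.pyGetD report (i - 1) 0 - PySem.List.pyGetD report i 0|) ||
      decide (|PySem.List.pyGetD report (i - 1) 0 - PySem.List.pyGetD report i 0| < 1) ||
      (PySem.List.pyGetD report (i - 1) 0 == PySem.List.pyGetD report i 0)))

def dampener (report : List Int) : Bool :=
  (List.range report.length).any (fun i =>
    match PySem.List.pop? report (i : Int) with
    | some (_, dampened) => check1 dampened && check2 dampened
    | none => false)   -- unreachable guard: i < len, pop? always succeeds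

-- ===== PORT B =====
def chainFrom (cmp : Int → Int → Bool) (report : List Int) (j : Int) : Bool :=
  (PySem.List.pyRange j report.length 1).all (fun k =>
    cmp (PySem.List.pyGetD report (k - 1) 0) (PySem.List.pyGetD report k 0))

def damp (cmp : Int → Int → Bool) (report : List Int) : Bool :=
  let n : Int := report.length
  let get := fun i => PySem.List.pyGetD report i 0
  match (PySem.List.pyRange 1 n 1).find? (fun i => !cmp (get (i - 1)) (get i)) with
  | none => decide (1 ≤ n)
  | some i =>
      ((i == 1 || cmp (get (i - 2)) (get i)) && chainFrom cmp report (i + 1)) ||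
      ((i == n - 1 || cmp (get (i - 1)) (get (i + 1))) && chainFrom cmp report (i + 2))

def dampener_alt (report : List Int) : Bool :=
  damp (fun a b => decide (1 ≤ b - a ∧ b - a ≤ 3)) report ||
  damp (fun a b => decide (1 ≤ a - b ∧ a - b ≤ 3)) report

-- ===== PRECONDITION & SPEC =====
def Spec_dampener (report : List Int) (out : Bool) : Prop := out = dampener_alt report
instance (report : List Int) (out : Bool) : Decidable (Spec_dampener report out) := by unfold Spec_dampener; infer_instance

-- ===== CLAIM (what is proved, stated in full; the proofs are below) =====
def Claim_equal_dampener : Prop := ∀ (report : List Int), Dom_dampener report → Spec_dampener report (dampener report)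

-- ===== LEMMAS AND PROOFS =====

-- adjacent-pair chain of a comparison, as an indexed proposition
def Ch (c : Int → Int → Bool) (l : List Int) : Prop :=
  ∀ k : Nat, (h : k + 1 < l.length) → c l[k] l[k + 1] = true

lemma getI (l : List Int) (i : Int) (m : Nat) (h1 : i = (m : Int)) (h2 : m < l.length) :
    PySem.List.pyGetD l i 0 = l[m] := by
  subst h1; rw [PySem.List.pyGetD_natCast, List.getD_eq_getElem _ _ h2]

lemma getIdx_congr (l : List Int) (i j : Nat) (h : i = j) (hi : i < l.length) :
    l[i] = l[j]'(h ▸ hi) := by subst h; rfl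

lemma er_len (l : List Int) (j : Nat) (hj : j < l.length) :
    (l.eraseIdx j).length = l.length - 1 := by
  rw [List.length_eraseIdx]; simp [hj]

lemma er_get (l : List Int) (j k t : Nat) (h : k < (l.eraseIdx j).length) (ht : t < l.length)
    (he : (k < j ∧ t = k) ∨ (j ≤ k ∧ t = k + 1)) : (l.eraseIdx j)[k] = l[t] := by
  rw [List.getElem_eraseIdx]
  rcases he with ⟨h1, h2⟩ | ⟨h1, h2⟩
  · rw [dif_pos h1]; subst h2; rfl
  · rw [dif_neg (by omega)]; subst h2; rfl

lemma chA (c : Int → Int → Bool) (l : List Int) (m : Nat) (hm : m + 1 < l.length)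
    (pre : ∀ k : Nat, (hk : k + 1 ≤ m) → c (l[k]'(by omega)) (l[k + 1]'(by omega)) = true) :
    Ch c (l.eraseIdx m) ↔
      ((∀ _ : 1 ≤ m, c (l[m - 1]'(by omega)) (l[m + 1]'hm) = true) ∧
       (∀ k : Nat, m + 1 ≤ k → (h : k + 1 < l.length) → c l[k] l[k + 1] = true)) := by
  have hlen := er_len l m (by omega)
  constructor
  · intro H
    constructor
    · intro hx
      have hb : m - 1 + 1 < (l.eraseIdx m).length := by omega
      have := H (m - 1) hb
      rwa [er_get l m (m - 1) (m - 1) (by omega) (by omega) (Or.inl ⟨by omega, rfl⟩),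
           er_get l m (m - 1 + 1) (m + 1) (by omega) (by omega) (Or.inr ⟨by omega, by omega⟩)] at this
    · intro k hk h
      have hb : k - 1 + 1 < (l.eraseIdx m).length := by omega
      have := H (k - 1) hb
      rwa [er_get l m (k - 1) k (by omega) (by omega) (Or.inr ⟨by omega, by omega⟩),
           er_get l m (k - 1 + 1) (k + 1) (by omega) (by omega) (Or.inr ⟨by omega, by omega⟩)] at this
  · rintro ⟨h1, h2⟩ k h
    by_cases hc1 : k + 1 < m
    · rw [er_get l m k k (by omega) (by omega) (Or.inl ⟨by omega, rfl⟩),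
          er_get l m (k + 1) (k + 1) (by omega) (by omega) (Or.inl ⟨by omega, rfl⟩)]
      exact pre k (by omega)
    · by_cases hc2 : k + 1 = m
      · rw [er_get l m k k (by omega) (by omega) (Or.inl ⟨by omega, rfl⟩),
            er_get l m (k + 1) (k + 2) (by omega) (by omega) (Or.inr ⟨by omega, by omega⟩)]
        have := h1 (by omega)
        have e1 : m - 1 = k := by omega
        have e2 : m + 1 = k + 2 := by omega
        rw [getIdx_congr l (m - 1) k e1, getIdx_congr l (m + 1) (k + 2) e2] at this
        exact this
      · rw [er_get l m k (k + 1) (by omega) (by omega) (Or.inr ⟨by omega, rfl⟩),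
            er_get l m (k + 1) (k + 2) (by omega) (by omega) (Or.inr ⟨by omega, by omega⟩)]
        exact h2 (k + 1) (by omega) (by omega)

lemma chB (c : Int → Int → Bool) (l : List Int) (m : Nat) (hm : m + 1 < l.length)
    (pre : ∀ k : Nat, (hk : k + 1 ≤ m) → c (l[k]'(by omega)) (l[k + 1]'(by omega)) = true) :
    Ch c (l.eraseIdx (m + 1)) ↔
      ((∀ hx : m + 2 < l.length, c (l[m]'(by omega)) (l[m + 2]'hx) = true) ∧
       (∀ k : Nat, m + 2 ≤ k → (h : k + 1 < l.length) → c l[k] l[k + 1] = true)) := by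
  have hlen := er_len l (m + 1) (by omega)
  constructor
  · intro H
    constructor
    · intro hx
      have := H m (by omega)
      rwa [er_get l (m + 1) m m (by omega) (by omega) (Or.inl ⟨by omega, rfl⟩),
           er_get l (m + 1) (m + 1) (m + 2) (by omega) (by omega) (Or.inr ⟨by omega, rfl⟩)] at this
    · intro k hk h
      have := H (k - 1) (by omega)
      rwa [er_get l (m + 1) (k - 1) k (by omega) (by omega) (Or.inr ⟨by omega, by omega⟩),
           er_get l (m + 1) (k - 1 + 1) (k + 1) (by omega) (by omega) (Or.inr ⟨by omega, by omega⟩)] at this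
  · rintro ⟨h1, h2⟩ k h
    by_cases hc1 : k < m
    · rw [er_get l (m + 1) k k (by omega) (by omega) (Or.inl ⟨by omega, rfl⟩),
          er_get l (m + 1) (k + 1) (k + 1) (by omega) (by omega) (Or.inl ⟨by omega, rfl⟩)]
      exact pre k (by omega)
    · by_cases hc2 : k = m
      · rw [er_get l (m + 1) k k (by omega) (by omega) (Or.inl ⟨by omega, rfl⟩),
            er_get l (m + 1) (k + 1) (k + 2) (by omega) (by omega) (Or.inr ⟨by omega, rfl⟩)]
        have := h1 (by omega)
        rw [getIdx_congr l m k hc2.symm, getIdx_congr l (m + 2) (k + 2) (by omega)] at this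
        exact this
      · rw [er_get l (m + 1) k (k + 1) (by omega) (by omega) (Or.inr ⟨by omega, rfl⟩),
            er_get l (m + 1) (k + 1) (k + 2) (by omega) (by omega) (Or.inr ⟨by omega, by omega⟩)]
        exact h2 (k + 1) (by omega) (by omega)

lemma chC (c : Int → Int → Bool) (l : List Int) (m j : Nat) (hm : m + 1 < l.length)
    (viol : c (l[m]'(by omega)) (l[m + 1]'hm) = false) (hj : j < l.length)
    (hne : j ≠ m) (hne2 : j ≠ m + 1) : ¬ Ch c (l.eraseIdx j) := by
  intro H
  have hlen := er_len l j hj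
  by_cases hlt : j < m
  · have := H (m - 1) (by omega)
    rw [er_get l j (m - 1) m (by omega) (by omega) (Or.inr ⟨by omega, by omega⟩),
        er_get l j (m - 1 + 1) (m + 1) (by omega) (by omega) (Or.inr ⟨by omega, by omega⟩)] at this
    rw [viol] at this; exact absurd this (by simp)
  · have hgt : m + 1 < j := by omega
    have := H m (by omega)
    rw [er_get l j m m (by omega) (by omega) (Or.inl ⟨by omega, rfl⟩),
        er_get l j (m + 1) (m + 1) (by omega) (by omega) (Or.inl ⟨by omega, rfl⟩)] at this
    rw [viol] at this; exact absurd this (by simp)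

lemma pairAll_iff (p : Int → Int → Bool) (l : List Int) (j : Int) (hj : 1 ≤ j) :
    ((PySem.List.pyRange j l.length 1).all
      (fun i => p (PySem.List.pyGetD l (i - 1) 0) (PySem.List.pyGetD l i 0)) = true)
    ↔ ∀ k : Nat, j ≤ (k : Int) + 1 → (h : k + 1 < l.length) → p l[k] l[k + 1] = true := by
  rw [List.all_eq_true]
  constructor
  · intro H k hk h
    have hx := H ((k : Int) + 1) (by
      rw [PySem.List.mem_pyRange_one]
      constructor
      · exact hk
      · omega)
    have e1 : ((k : Int) + 1 - 1) = ((k : Nat) : Int) := by ring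
    rw [e1] at hx
    have e2 : ((k : Int) + 1) = (((k + 1 : Nat)) : Int) := by push_cast; ring
    rw [e2] at hx
    rw [PySem.List.pyGetD_natCast, PySem.List.pyGetD_natCast] at hx
    rwa [List.getD_eq_getElem _ _ (by omega), List.getD_eq_getElem _ _ (by omega)] at hx
  · intro H x hx
    obtain ⟨h1, h2⟩ := (PySem.List.mem_pyRange_one).mp hx
    have h1' : 1 ≤ x := le_trans hj h1
    have h2' : x < (l.length : Int) := h2
    set k : Nat := (x - 1).toNat with hk
    have hx' : x = (k : Int) + 1 := by omega
    have hkl : k + 1 < l.length := by omega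
    have := H k (by omega) hkl
    rw [hx']
    have e1 : ((k : Int) + 1 - 1) = ((k : Nat) : Int) := by ring
    have e2 : ((k : Int) + 1) = (((k + 1 : Nat)) : Int) := by push_cast; ring
    rw [e1, e2, PySem.List.pyGetD_natCast, PySem.List.pyGetD_natCast,
      List.getD_eq_getElem _ _ (by omega), List.getD_eq_getElem _ _ (by omega)]
    exact this

lemma find?_pyRange_one (p : Int → Bool) : ∀ (fuel : Nat) (a b : Int), (b - a).toNat = fuel → ∀ i : Int,
    ((PySem.List.pyRange a b 1).find? p = some i ↔
      (a ≤ i ∧ i < b ∧ p i = true ∧ ∀ x : Int, a ≤ x → x < i → p x = false)) := by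
  intro fuel
  induction fuel with
  | zero =>
    intro a b hf i
    rw [PySem.List.pyRange_one_eq_nil (by omega)]
    simp only [List.find?_nil]
    constructor
    · intro h; exact absurd h (by simp)
    · intro ⟨h1, h2, _, _⟩; omega
  | succ m ih =>
    intro a b hf i
    rw [PySem.List.pyRange_one_cons (by omega)]
    by_cases hpa : p a = true
    · rw [List.find?_cons_of_pos hpa]
      constructor
      · intro h
        injection h with h; subst h
        exact ⟨le_refl _, by omega, hpa, fun x hx1 hx2 => by omega⟩
      · rintro ⟨h1, h2, h3, h4⟩
        by_cases hia : i = a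
        · rw [hia]
        · have := h4 a (le_refl _) (by omega)
          rw [hpa] at this; exact absurd this (by simp)
    · rw [List.find?_cons_of_neg hpa]
      rw [ih (a + 1) b (by omega) i]
      constructor
      · rintro ⟨h1, h2, h3, h4⟩
        refine ⟨by omega, h2, h3, fun x hx1 hx2 => ?_⟩
        by_cases hxa : x = a
        · subst hxa; exact Bool.not_eq_true _ ▸ (by simpa using hpa)
        · exact h4 x (by omega) hx2
      · rintro ⟨h1, h2, h3, h4⟩
        have hia : a < i := by
          rcases lt_or_eq_of_le h1 with h | h
          · exact h
          · subst h; rw [h3] at hpa; exact absurd rfl hpa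
        exact ⟨by omega, h2, h3, fun x hx1 hx2 => h4 x (by omega) hx2⟩


lemma damp_iff (c : Int → Int → Bool) (l : List Int) :
    damp c l = true ↔ ∃ j : Nat, j < l.length ∧ Ch c (l.eraseIdx j) := by
  unfold damp
  simp only []
  cases hF : (PySem.List.pyRange 1 (l.length : Int) 1).find?
      (fun i => !c (PySem.List.pyGetD l (i - 1) 0) (PySem.List.pyGetD l i 0)) with
  | none =>
    have hall := List.find?_eq_none.mp hF
    have hchain : ∀ k : Nat, (h : k + 1 < l.length) → c l[k] l[k + 1] = true := by
      intro k h
      have := hall ((k : Int) + 1) (by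
        rw [PySem.List.mem_pyRange_one]; constructor
        · omega
        · omega)
      rw [getI l ((k : Int) + 1 - 1) k (by omega) (by omega),
          getI l ((k : Int) + 1) (k + 1) (by omega) (by omega)] at this
      simpa using this
    constructor
    · intro hn
      have hl : 1 ≤ l.length := by
        rw [decide_eq_true_eq] at hn; omega
      refine ⟨l.length - 1, by omega, ?_⟩
      intro k h
      rw [er_len l (l.length - 1) (by omega)] at h
      rw [er_get l (l.length - 1) k k (by omega) (by omega) (Or.inl ⟨by omega, rfl⟩),
          er_get l (l.length - 1) (k + 1) (k + 1) (by omega) (by omega) (Or.inl ⟨by omega, rfl⟩)]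
      exact hchain k (by omega)
    · rintro ⟨j, hj, _⟩
      rw [decide_eq_true_eq]; omega
  | some i =>
    obtain ⟨h1, h2, h3, h4⟩ := (find?_pyRange_one _ ((l.length : Int) - 1).toNat 1 (l.length : Int) (by omega) i).mp hF
    set m : Nat := (i - 1).toNat with hmdef
    have him : i = (m : Int) + 1 := by omega
    have hm : m + 1 < l.length := by omega
    have viol : c (l[m]'(by omega)) (l[m + 1]'hm) = false := by
      rw [getI l (i - 1) m (by omega) (by omega), getI l i (m + 1) (by omega) (by omega)] at h3
      simpa using h3
    have pre : ∀ k : Nat, (hk : k + 1 ≤ m) → c (l[k]'(by omega)) (l[k + 1]'(by omega)) = true := by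
      intro k hk
      have := h4 ((k : Int) + 1) (by omega) (by omega)
      rw [getI l ((k : Int) + 1 - 1) k (by omega) (by omega),
          getI l ((k : Int) + 1) (k + 1) (by omega) (by omega)] at this
      simpa using this
    rw [Bool.or_eq_true, Bool.and_eq_true, Bool.and_eq_true]
    have hcfA : chainFrom c l (i + 1) = true ↔
        (∀ k : Nat, m + 1 ≤ k → (h : k + 1 < l.length) → c l[k] l[k + 1] = true) := by
      unfold chainFrom
      rw [pairAll_iff c l (i + 1) (by omega)]
      constructor
      · intro H k hk h; exact H k (by omega) h
      · intro H k hk h; exact H k (by omega) h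
    have hcfB : chainFrom c l (i + 2) = true ↔
        (∀ k : Nat, m + 2 ≤ k → (h : k + 1 < l.length) → c l[k] l[k + 1] = true) := by
      unfold chainFrom
      rw [pairAll_iff c l (i + 2) (by omega)]
      constructor
      · intro H k hk h; exact H k (by omega) h
      · intro H k hk h; exact H k (by omega) h
    have hgA : ((i == 1 || c (PySem.List.pyGetD l (i - 2) 0) (PySem.List.pyGetD l i 0)) = true) ↔
        (∀ _ : 1 ≤ m, c (l[m - 1]'(by omega)) (l[m + 1]'hm) = true) := by
      rw [Bool.or_eq_true, beq_iff_eq]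
      constructor
      · rintro (hi1 | hc) hx
        · omega
        · rwa [getI l (i - 2) (m - 1) (by omega) (by omega), getI l i (m + 1) (by omega) (by omega)] at hc
      · intro H
        by_cases hm0 : m = 0
        · left; omega
        · right
          rw [getI l (i - 2) (m - 1) (by omega) (by omega), getI l i (m + 1) (by omega) (by omega)]
          exact H (by omega)
    have hgB : ((i == (l.length : Int) - 1 || c (PySem.List.pyGetD l (i - 1) 0) (PySem.List.pyGetD l (i + 1) 0)) = true) ↔
        (∀ hx : m + 2 < l.length, c (l[m]'(by omega)) (l[m + 2]'hx) = true) := by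
      rw [Bool.or_eq_true, beq_iff_eq]
      constructor
      · rintro (hi1 | hc) hx
        · omega
        · rwa [getI l (i - 1) m (by omega) (by omega), getI l (i + 1) (m + 2) (by omega) (by omega)] at hc
      · intro H
        by_cases hml : m + 2 = l.length
        · left; omega
        · right
          rw [getI l (i - 1) m (by omega) (by omega), getI l (i + 1) (m + 2) (by omega) (by omega)]
          exact H (by omega)
    rw [hcfA, hcfB, hgA, hgB, ← chA c l m hm pre, ← chB c l m hm pre]
    constructor
    · rintro (hA | hB)
      · exact ⟨m, by omega, hA⟩
      · exact ⟨m + 1, by omega, hB⟩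
    · rintro ⟨j, hj, hCh⟩
      by_cases hjm : j = m
      · left; exact hjm ▸ hCh
      · by_cases hjm1 : j = m + 1
        · right; exact hjm1 ▸ hCh
        · exact absurd hCh (chC c l m j hm viol hj hjm hjm1)

lemma adj_trans {R : Int → Int → Prop} (ht : ∀ a b c, R a b → R b c → R a c) (l : List Int)
    (h : ∀ k : Nat, (hk : k + 1 < l.length) → R l[k] l[k + 1]) :
    ∀ i j : Nat, (hj : j < l.length) → (hij : i < j) → R (l[i]'(by omega)) (l[j]'hj) := by
  intro i j
  induction j with
  | zero => omega
  | succ j ih =>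
    intro hj hij
    by_cases hij' : i = j
    · subst hij'; exact h i hj
    · exact ht _ _ _ (ih (by omega) (by omega)) (h j hj)


lemma cond_arith (a b : Int) :
    (!(decide (3 < |a - b|) || decide (|a - b| < 1) || (a == b)))
     = (decide (1 ≤ b - a ∧ b - a ≤ 3) || decide (1 ≤ a - b ∧ a - b ≤ 3)) := by
  apply Bool.eq_iff_iff.mpr
  rcases abs_cases (a - b) with ⟨h1, h2⟩ | ⟨h1, h2⟩ <;>
    simp only [Bool.not_eq_true', Bool.or_eq_true, Bool.or_eq_false_iff,
      decide_eq_true_eq, decide_eq_false_iff_not, beq_eq_false_iff_ne, ne_eq] <;>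
    constructor <;> intro h <;> omega


lemma check2_iff (l : List Int) :
    check2 l = true ↔ ∀ k : Nat, (h : k + 1 < l.length) →
      (decide (1 ≤ l[k + 1] - l[k] ∧ l[k + 1] - l[k] ≤ 3) ||
       decide (1 ≤ l[k] - l[k + 1] ∧ l[k] - l[k + 1] ≤ 3)) = true := by
  have hP := pairAll_iff
    (fun a b => !(decide (3 < |a - b|) || decide (|a - b| < 1) || (a == b))) l 1 (le_refl _)
  have hP' : check2 l = true ↔ ∀ k : Nat, 1 ≤ (k : Int) + 1 → (h : k + 1 < l.length) →
      (!(decide (3 < |l[k] - l[k + 1]|) || decide (|l[k] - l[k + 1]| < 1) ||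
        (l[k] == l[k + 1]))) = true := hP
  rw [hP']
  constructor
  · intro H k h
    have := H k (by omega) h
    rwa [cond_arith] at this
  · intro H k _ h
    rw [cond_arith]
    exact H k h

lemma check12_iff (c₁ c₂ : Int → Int → Bool)
    (h₁ : ∀ a b, c₁ a b = decide (1 ≤ b - a ∧ b - a ≤ 3))
    (h₂ : ∀ a b, c₂ a b = decide (1 ≤ a - b ∧ a - b ≤ 3))
    (l : List Int) :
    (check1 l && check2 l) = true ↔ (Ch c₁ l ∨ Ch c₂ l) := by
  rw [Bool.and_eq_true, check2_iff]
  have hch1 : check1 l = true ↔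
      (l = PySem.List.sorted l (fun x => x) false ∨ l = PySem.List.sorted l (fun x => x) true) := by
    unfold check1
    rw [List.contains_iff_mem]
    simp [List.mem_cons]
  rw [hch1]
  constructor
  · rintro ⟨hs | hs, h2⟩
    · left
      have hp := PySem.List.sorted_pairwise l (fun x => x)
      rw [← hs, List.pairwise_iff_getElem] at hp
      intro k h
      have hle : l[k] ≤ l[k + 1] := hp k (k + 1) (by omega) h (by omega)
      have := h2 k h
      rw [h₁]
      rw [Bool.or_eq_true, decide_eq_true_eq, decide_eq_true_eq] at this
      rw [decide_eq_true_eq]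
      omega
    · right
      have hp := PySem.List.sorted_pairwise_rev l (fun x => x)
      rw [← hs, List.pairwise_iff_getElem] at hp
      intro k h
      have hle : l[k + 1] ≤ l[k] := hp k (k + 1) (by omega) h (by omega)
      have := h2 k h
      rw [h₂]
      rw [Bool.or_eq_true, decide_eq_true_eq, decide_eq_true_eq] at this
      rw [decide_eq_true_eq]
      omega
  · rintro (hc | hc)
    · have hadj : ∀ k : Nat, (hk : k + 1 < l.length) → l[k] < l[k + 1] := by
        intro k hk
        have := hc k hk
        rw [h₁, decide_eq_true_eq] at this
        omega
      have hp : l.Pairwise (fun a b => a < b) := by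
        rw [List.pairwise_iff_getElem]
        intro i j hi hj hij
        exact adj_trans (R := fun a b => a < b) (fun _ _ _ h1 h2 => lt_trans h1 h2) l hadj i j hj hij
      refine ⟨Or.inl (PySem.List.sorted_eq_of_perm_of_pairwise_lt l l (fun x => x) (List.Perm.refl l) hp).symm, ?_⟩
      intro k h
      have := hc k h
      rw [h₁, decide_eq_true_eq] at this
      rw [Bool.or_eq_true, decide_eq_true_eq, decide_eq_true_eq]
      omega
    · have hadj : ∀ k : Nat, (hk : k + 1 < l.length) → l[k + 1] < l[k] := by
        intro k hk
        have := hc k hk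
        rw [h₂, decide_eq_true_eq] at this
        omega
      have hp : l.Pairwise (fun a b => b < a) := by
        rw [List.pairwise_iff_getElem]
        intro i j hi hj hij
        exact adj_trans (R := fun a b => b < a) (fun a b c h1 h2 => lt_trans h2 h1) l hadj i j hj hij
      refine ⟨Or.inr (PySem.List.sorted_rev_eq_of_perm_of_pairwise_gt l l (fun x => x) (List.Perm.refl l) hp).symm, ?_⟩
      intro k h
      have := hc k h
      rw [h₂, decide_eq_true_eq] at this
      rw [Bool.or_eq_true, decide_eq_true_eq, decide_eq_true_eq]
      omega

lemma dampener_iff (c₁ c₂ : Int → Int → Bool)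
    (h₁ : ∀ a b, c₁ a b = decide (1 ≤ b - a ∧ b - a ≤ 3))
    (h₂ : ∀ a b, c₂ a b = decide (1 ≤ a - b ∧ a - b ≤ 3))
    (l : List Int) :
    dampener l = true ↔
      ∃ j : Nat, j < l.length ∧ (Ch c₁ (l.eraseIdx j) ∨ Ch c₂ (l.eraseIdx j)) := by
  unfold dampener
  rw [List.any_eq_true]
  constructor
  · rintro ⟨x, hx, hp⟩
    rw [List.mem_range] at hx
    rw [PySem.List.pop?_natCast l x hx] at hp
    have hp' : (check1 (l.eraseIdx x) && check2 (l.eraseIdx x)) = true := hp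
    exact ⟨x, hx, (check12_iff c₁ c₂ h₁ h₂ (l.eraseIdx x)).mp hp'⟩
  · rintro ⟨j, hj, hCh⟩
    refine ⟨j, List.mem_range.mpr hj, ?_⟩
    rw [PySem.List.pop?_natCast l j hj]
    exact (check12_iff c₁ c₂ h₁ h₂ (l.eraseIdx j)).mpr hCh

-- ===== VERDICT (by name: the statement is the Claim_ definition above) =====
theorem dampener_spec : Claim_equal_dampener := by
  intro report _
  unfold Spec_dampener
  rw [Bool.eq_iff_iff]
  set c₁ : Int → Int → Bool := fun a b => decide (1 ≤ b - a ∧ b - a ≤ 3) with hc₁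
  set c₂ : Int → Int → Bool := fun a b => decide (1 ≤ a - b ∧ a - b ≤ 3) with hc₂
  rw [dampener_iff c₁ c₂ (fun _ _ => rfl) (fun _ _ => rfl) report]
  unfold dampener_alt
  rw [Bool.or_eq_true, damp_iff c₁ report, damp_iff c₂ report]
  constructor
  · rintro ⟨j, hj, h | h⟩
    · exact Or.inl ⟨j, hj, h⟩
    · exact Or.inr ⟨j, hj, h⟩
  · rintro (⟨j, hj, h⟩ | ⟨j, hj, h⟩) <;> exact ⟨j, hj, by tauto⟩
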